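-- pv_equiv track=rewrite | github.com/b-vitamins/bibmgr | bibmgr/operations/formatters.py | _format_authors_mla
-- ===== SOURCE A (Python) =====
-- def _format_authors_mla(authors: str) -> str:
--     """Format authors in MLA style."""
--     author_list = authors.split(" and ")
--     formatted = []
--
--     for i, author in enumerate(author_list):
--         author = author.strip()
--         # First author is in "Last, First" format
--         # Subsequent authors are in "First Last" format
--         if i == 0:
--             # Keep as is if already in Last, First format
--             if "," in author:
--                 formatted.append(author)
--             else:
--                 # Convert First Last to Last, First
--                 parts = author.split()
--                 if len(parts) > 1:
--                     formatted.append(f"{parts[-1]}, {' '.join(parts[:-1])}")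
--                 else:
--                     formatted.append(author)
--         else:
--             # For 2nd+ authors, convert to First Last format if needed
--             if "," in author:
--                 # Convert from Last, First to First Last
--                 last, first = author.split(",", 1)
--                 formatted.append(f"{first.strip()} {last.strip()}")
--             else:
--                 formatted.append(author)
--
--     if len(formatted) == 1:
--         return formatted[0]
--     elif len(formatted) == 2:
--         return f"{formatted[0]}, and {formatted[1]}"
--     else:
--         # MLA uses et al. for 3+ authors
--         return formatted[0] + ", et al."
-- ===== SOURCE B (Python) =====
-- def _mla_lead(author: str) -> str:
--     """Normalise the lead author into 'Last, First' form."""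
--     a = author.strip()
--     if "," in a:
--         return a
--     words = a.split()
--     if len(words) > 1:
--         return f"{words[-1]}, {' '.join(words[:-1])}"
--     return a
--
--
-- def _mla_co(author: str) -> str:
--     """Normalise a co-author into 'First Last' form."""
--     a = author.strip()
--     if "," in a:
--         last, first = a.split(",", 1)
--         return f"{first.strip()} {last.strip()}"
--     return a
--
--
-- def _format_authors_mla(authors: str) -> str:
--     # Work on the raw string: peel off the lead author with partition and
--     # decide the layout by whether another separator remains in the tail;
--     # the author list is never materialised and only the shown authors are touched.
--     head, sep, tail = authors.partition(" and ")
--     if not sep: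
--         return _mla_lead(head)
--     if " and " in tail:
--         return _mla_lead(head) + ", et al."
--     return f"{_mla_lead(head)}, and {_mla_co(tail)}"
-- ===== Notes on version B (the rewrite author's own statement) =====
-- stated objective: alternative
-- what changed: Instead of splitting the string into a list of all authors and normalising every one in an enumerate loop, B peels off only the lead author with str.partition, decides the layout by a single substring test on the remaining tail, and normalises just the one or two authors the citation shows.
import Mathlib
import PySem

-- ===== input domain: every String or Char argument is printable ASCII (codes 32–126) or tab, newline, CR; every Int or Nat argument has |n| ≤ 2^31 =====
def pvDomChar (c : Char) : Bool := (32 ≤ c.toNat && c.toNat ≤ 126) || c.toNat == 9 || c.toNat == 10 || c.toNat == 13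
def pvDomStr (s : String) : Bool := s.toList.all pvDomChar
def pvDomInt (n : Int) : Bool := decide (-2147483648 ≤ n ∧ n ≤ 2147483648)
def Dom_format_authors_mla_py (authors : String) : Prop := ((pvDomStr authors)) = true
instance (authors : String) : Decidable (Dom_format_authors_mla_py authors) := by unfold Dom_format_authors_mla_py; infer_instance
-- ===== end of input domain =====

-- B replaces A's split-into-list + enumerate-loop by partition/substring tests on
-- the raw string, normalising only the authors the citation shows (objective: alternative).


-- ===== PORT A =====
def format_authors_mla_py (authors : String) : String :=
  let author_list := PySem.Chars.splitOn authors.toList (" and ".toList)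
  let formatted := (PySem.List.enumerate author_list).foldl (fun (acc : List (List Char)) (p : Int × List Char) =>
    let author := PySem.Chars.strip p.2
    if p.1 == 0 then
      if PySem.Chars.isIn (",".toList) author then acc ++ [author]
      else
        let parts := PySem.Chars.split₀ author
        if parts.length > 1 then
          acc ++ [PySem.List.pyGetD parts (-1) [] ++ (", ".toList) ++
                  PySem.Chars.join (" ".toList) (PySem.List.slice parts none (some (-1)))]
        else acc ++ [author]
    else
      if PySem.Chars.isIn (",".toList) author then
        -- 'last, first = author.split(",", 1)': the comma guarantees exactly two pieces
        let pieces := PySem.Chars.splitOnMax author (",".toList) 1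
        acc ++ [PySem.Chars.strip (PySem.List.pyGetD pieces 1 []) ++ (" ".toList) ++
                PySem.Chars.strip (PySem.List.pyGetD pieces 0 [])]
      else acc ++ [author]) ([] : List (List Char))
  if formatted.length == 1 then String.ofList (PySem.List.pyGetD formatted 0 [])
  else if formatted.length == 2 then
    String.ofList (PySem.List.pyGetD formatted 0 [] ++ (", and ".toList) ++ PySem.List.pyGetD formatted 1 [])
  else String.ofList (PySem.List.pyGetD formatted 0 [] ++ (", et al.".toList))

-- ===== PORT B =====
def mlaLead (author : List Char) : List Char :=
  let a := PySem.Chars.strip author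
  if PySem.Chars.isIn (",".toList) a then a
  else
    let words := PySem.Chars.split₀ a
    if words.length > 1 then
      PySem.List.pyGetD words (-1) [] ++ (", ".toList) ++
        PySem.Chars.join (" ".toList) (PySem.List.slice words none (some (-1)))
    else a

def mlaCo (author : List Char) : List Char :=
  let a := PySem.Chars.strip author
  if PySem.Chars.isIn (",".toList) a then
    -- the comma guarantees split(",", 1) yields exactly two pieces
    let pieces := PySem.Chars.splitOnMax a (",".toList) 1
    PySem.Chars.strip (PySem.List.pyGetD pieces 1 []) ++ (" ".toList) ++
      PySem.Chars.strip (PySem.List.pyGetD pieces 0 [])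
  else a

def format_authors_mla_py_alt (authors : String) : String :=
  let s := authors.toList
  let sepL := " and ".toList
  -- head, sep, tail = authors.partition(" and "): exact — CPython's partition cuts
  -- at the FIRST occurrence, i.e. at index find(s, sep) when that is not -1
  let i := PySem.Chars.find s sepL
  if i == -1 then String.ofList (mlaLead s)
  else
    let head := s.take i.toNat
    let tail := s.drop (i.toNat + sepL.length)
    if PySem.Chars.isIn sepL tail then String.ofList (mlaLead head ++ (", et al.".toList))
    else String.ofList (mlaLead head ++ (", and ".toList) ++ mlaCo tail)

-- ===== PRECONDITION & SPEC =====
def Spec_format_authors_mla_py (authors : String) (out : String) : Prop := out = format_authors_mla_py_alt authors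
instance (authors : String) (out : String) : Decidable (Spec_format_authors_mla_py authors out) := by unfold Spec_format_authors_mla_py; infer_instance

-- ===== CLAIM (what is proved, stated in full; the proofs are below) =====
def Claim_equal_format_authors_mla_py : Prop := ∀ (authors : String), Dom_format_authors_mla_py authors → Spec_format_authors_mla_py authors (format_authors_mla_py authors)

-- ===== LEMMAS AND PROOFS =====

-- the value A's loop appends for the entry p = (index, author)
def contribA (p : Int × List Char) : List Char :=
  let author := PySem.Chars.strip p.2
  if p.1 == 0 then
    if PySem.Chars.isIn (",".toList) author then author
    else
      let parts := PySem.Chars.split₀ author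
      if parts.length > 1 then
        PySem.List.pyGetD parts (-1) [] ++ (", ".toList) ++
          PySem.Chars.join (" ".toList) (PySem.List.slice parts none (some (-1)))
      else author
  else
    if PySem.Chars.isIn (",".toList) author then
      let pieces := PySem.Chars.splitOnMax author (",".toList) 1
      PySem.Chars.strip (PySem.List.pyGetD pieces 1 []) ++ (" ".toList) ++
        PySem.Chars.strip (PySem.List.pyGetD pieces 0 [])
    else author

lemma contribA_zero (x : List Char) : contribA (0, x) = mlaLead x := by
  simp [contribA, mlaLead]

lemma contribA_ne (i : Int) (x : List Char) (h : ¬ i = 0) : contribA (i, x) = mlaCo x := by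
  simp [contribA, mlaCo, h]

lemma foldA_eq (l : List (Int × List Char)) (acc : List (List Char)) :
    l.foldl (fun (acc : List (List Char)) (p : Int × List Char) =>
      let author := PySem.Chars.strip p.2
      if p.1 == 0 then
        if PySem.Chars.isIn (",".toList) author then acc ++ [author]
        else
          let parts := PySem.Chars.split₀ author
          if parts.length > 1 then
            acc ++ [PySem.List.pyGetD parts (-1) [] ++ (", ".toList) ++
                    PySem.Chars.join (" ".toList) (PySem.List.slice parts none (some (-1)))]
          else acc ++ [author]
      else
        if PySem.Chars.isIn (",".toList) author then
          let pieces := PySem.Chars.splitOnMax author (",".toList) 1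
          acc ++ [PySem.Chars.strip (PySem.List.pyGetD pieces 1 []) ++ (" ".toList) ++
                  PySem.Chars.strip (PySem.List.pyGetD pieces 0 [])]
        else acc ++ [author]) acc = acc ++ l.map contribA := by
  have hfun : (fun (acc : List (List Char)) (p : Int × List Char) =>
      let author := PySem.Chars.strip p.2
      if p.1 == 0 then
        if PySem.Chars.isIn (",".toList) author then acc ++ [author]
        else
          let parts := PySem.Chars.split₀ author
          if parts.length > 1 then
            acc ++ [PySem.List.pyGetD parts (-1) [] ++ (", ".toList) ++
                    PySem.Chars.join (" ".toList) (PySem.List.slice parts none (some (-1)))]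
          else acc ++ [author]
      else
        if PySem.Chars.isIn (",".toList) author then
          let pieces := PySem.Chars.splitOnMax author (",".toList) 1
          acc ++ [PySem.Chars.strip (PySem.List.pyGetD pieces 1 []) ++ (" ".toList) ++
                  PySem.Chars.strip (PySem.List.pyGetD pieces 0 [])]
        else acc ++ [author]) = (fun acc p => acc ++ [contribA p]) := by
    funext acc p
    simp only [contribA]
    split
    · split
      · rfl
      · split <;> rfl
    · split <;> rfl
  rw [hfun, PySem.List.foldl_append_singleton_eq_map]

-- find.go unfolding and index-shift lemmas
lemma findGo_cons (sub : List Char) (c : Char) (t : List Char) (k : Nat) :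
    PySem.Chars.find.go sub (c :: t) k =
      if sub.isPrefixOf (c :: t) = true then (k : Int) else PySem.Chars.find.go sub t (k + 1) := by
  rw [PySem.Chars.find.go.eq_def]

lemma findGo_nil (sub : List Char) (k : Nat) :
    PySem.Chars.find.go sub [] k = if sub.isEmpty = true then (k : Int) else -1 := by
  rw [PySem.Chars.find.go.eq_def]

lemma findGo_shift (sub l : List Char) (k : Nat) :
    PySem.Chars.find.go sub l k =
      if PySem.Chars.find.go sub l 0 = -1 then -1 else PySem.Chars.find.go sub l 0 + k := by
  induction l generalizing k with
  | nil =>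
    rw [findGo_nil, findGo_nil]
    split_ifs <;> omega
  | cons c t ih =>
    rw [findGo_cons, findGo_cons]
    by_cases hp : sub.isPrefixOf (c :: t) = true
    · simp [hp]
    · simp only [hp, if_false, Bool.false_eq_true]
      rw [ih (k + 1), ih 1]
      have hge : -1 ≤ PySem.Chars.find.go sub t 0 := PySem.Chars.neg_one_le_find t sub
      split_ifs <;> omega

lemma find_cons_of_prefix (sub : List Char) (c : Char) (rest : List Char)
    (h : sub.isPrefixOf (c :: rest) = true) :
    PySem.Chars.find (c :: rest) sub = 0 := by
  rw [PySem.Chars.find, findGo_cons]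
  simp [h]

lemma find_cons_of_not_prefix (sub : List Char) (c : Char) (rest : List Char)
    (h : sub.isPrefixOf (c :: rest) = false) :
    PySem.Chars.find (c :: rest) sub =
      if PySem.Chars.find rest sub = -1 then -1 else PySem.Chars.find rest sub + 1 := by
  rw [PySem.Chars.find, findGo_cons, PySem.Chars.find]
  simp only [h, if_false, Bool.false_eq_true]
  exact findGo_shift sub rest 1

-- reference splitter: cut at the first occurrence of sep, recurse on the remainder
def splitF (sep l : List Char) : List (List Char) :=
  let i := PySem.Chars.find l sep
  if h : i = -1 ∨ sep = [] then [l]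
  else l.take i.toNat :: splitF sep (l.drop (i.toNat + sep.length))
termination_by l.length
decreasing_by
  push_neg at h
  have hinf : sep <:+: l := (PySem.Chars.find_ne_neg_one_iff l sep).mp h.1
  have h1 : 1 ≤ sep.length := List.length_pos_iff.mpr h.2
  have h2 : sep.length ≤ l.length := List.IsInfix.length_le hinf
  simp only [List.length_drop]
  omega

lemma splitF_ne_nil (sep l : List Char) : splitF sep l ≠ [] := by
  rw [splitF]
  split <;> simp

def prepF (p : List Char) (xs : List (List Char)) : List (List Char) :=
  match xs with
  | [] => [p]
  | x :: t => (p ++ x) :: t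

lemma prepF_nil (xs : List (List Char)) (h : xs ≠ []) : prepF [] xs = xs := by
  cases xs with
  | nil => exact absurd rfl h
  | cons x t => simp [prepF]

lemma splitOnGo_nil (sep : List Char) (fuel : Nat) (cur : List Char) (acc : List (List Char)) :
    PySem.Chars.splitOn.go sep (fuel + 1) [] cur acc = (cur.reverse :: acc).reverse := by
  rw [PySem.Chars.splitOn.go.eq_def]

lemma splitOnGo_cons (sep : List Char) (fuel : Nat) (c : Char) (rest cur : List Char)
    (acc : List (List Char)) :
    PySem.Chars.splitOn.go sep (fuel + 1) (c :: rest) cur acc =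
      if sep.isPrefixOf (c :: rest) = true then
        PySem.Chars.splitOn.go sep fuel (List.drop sep.length (c :: rest)) [] (cur.reverse :: acc)
      else PySem.Chars.splitOn.go sep fuel rest (c :: cur) acc := by
  rw [PySem.Chars.splitOn.go.eq_def]

lemma find_nil_of_ne (sep : List Char) (hsep : sep ≠ []) : PySem.Chars.find [] sep = -1 := by
  rw [PySem.Chars.find, findGo_nil]
  cases sep with
  | nil => exact absurd rfl hsep
  | cons a b => simp

lemma go_spec (sep : List Char) (hsep : sep ≠ []) :
    ∀ fuel l (cur : List Char) (acc : List (List Char)), l.length < fuel →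
      PySem.Chars.splitOn.go sep fuel l cur acc =
        acc.reverse ++ prepF cur.reverse (splitF sep l) := by
  intro fuel
  induction fuel with
  | zero => intro l cur acc h; omega
  | succ f ih =>
    intro l cur acc h
    cases l with
    | nil =>
      rw [splitOnGo_nil, splitF]
      simp [find_nil_of_ne sep hsep, prepF]
    | cons c rest =>
      rw [splitOnGo_cons]
      by_cases hp : sep.isPrefixOf (c :: rest) = true
      · simp only [hp, if_true]
        have hfind : PySem.Chars.find (c :: rest) sep = 0 := find_cons_of_prefix sep c rest hp
        have hinf : sep <:+: (c :: rest) :=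
          (PySem.Chars.find_ne_neg_one_iff (c :: rest) sep).mp (by rw [hfind]; decide)
        have hpos : 1 ≤ sep.length := List.length_pos_iff.mpr hsep
        rw [ih (List.drop sep.length (c :: rest)) [] (cur.reverse :: acc)
            (by simp only [List.length_drop, List.length_cons]
                simp only [List.length_cons] at h; omega)]
        have hsl : splitF sep (c :: rest) =
            [] :: splitF sep (List.drop sep.length (c :: rest)) := by
          rw [splitF]
          have hne : ¬((PySem.Chars.find (c :: rest) sep) = -1 ∨ sep = []) := by
            push_neg; exact ⟨by rw [hfind]; decide, hsep⟩
          rw [dif_neg hne]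
          simp [hfind]
        rw [hsl, List.reverse_nil, prepF_nil _ (splitF_ne_nil sep (List.drop sep.length (c :: rest)))]
        simp [prepF]
      · simp only [hp, if_false, Bool.false_eq_true]
        have hpf : sep.isPrefixOf (c :: rest) = false := by
          revert hp; cases sep.isPrefixOf (c :: rest) <;> simp
        rw [ih rest (c :: cur) acc (by simp only [List.length_cons] at h; omega)]
        have hfind := find_cons_of_not_prefix sep c rest hpf
        by_cases hr : PySem.Chars.find rest sep = -1
        · have hl : PySem.Chars.find (c :: rest) sep = -1 := by rw [hfind, if_pos hr]
          have hsl : splitF sep (c :: rest) = [c :: rest] := by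
            rw [splitF]; exact dif_pos (Or.inl hl)
          have hsr : splitF sep rest = [rest] := by
            rw [splitF]; exact dif_pos (Or.inl hr)
          simp [hsl, hsr, prepF]
        · have hr0 : 0 ≤ PySem.Chars.find rest sep := by
            have := PySem.Chars.neg_one_le_find rest sep; omega
          have hl : PySem.Chars.find (c :: rest) sep = PySem.Chars.find rest sep + 1 := by
            rw [hfind, if_neg hr]
          have hne1 : ¬(PySem.Chars.find (c :: rest) sep = -1 ∨ sep = []) := by
            push_neg; refine ⟨?_, hsep⟩; rw [hl]; omega
          have hne2 : ¬(PySem.Chars.find rest sep = -1 ∨ sep = []) := by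
            push_neg; exact ⟨hr, hsep⟩
          have hsl : splitF sep (c :: rest) =
              (c :: rest).take (PySem.Chars.find (c :: rest) sep).toNat ::
                splitF sep ((c :: rest).drop ((PySem.Chars.find (c :: rest) sep).toNat + sep.length)) := by
            rw [splitF]; exact dif_neg hne1
          have hsr : splitF sep rest =
              rest.take (PySem.Chars.find rest sep).toNat ::
                splitF sep (rest.drop ((PySem.Chars.find rest sep).toNat + sep.length)) := by
            rw [splitF]; exact dif_neg hne2
          have htn : (PySem.Chars.find (c :: rest) sep).toNat =
              (PySem.Chars.find rest sep).toNat + 1 := by rw [hl]; omega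
          rw [hsl, hsr]
          have hdp : (PySem.Chars.find rest sep).toNat + 1 + sep.length =
              ((PySem.Chars.find rest sep).toNat + sep.length) + 1 := by omega
          simp only [htn, prepF, List.take_succ_cons, hdp, List.drop_succ_cons, List.reverse_cons]
          simp

lemma splitOn_eq_splitF (l sep : List Char) (hsep : sep ≠ []) :
    PySem.Chars.splitOn l sep = splitF sep l := by
  rw [PySem.Chars.splitOn, go_spec sep hsep (l.length + 1) l [] [] (by omega)]
  simp [prepF_nil _ (splitF_ne_nil sep l)]

-- ===== VERDICT (by name: the statement is the Claim_ definition above) =====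
theorem format_authors_mla_py_spec : Claim_equal_format_authors_mla_py := by
  intro authors _
  unfold Spec_format_authors_mla_py format_authors_mla_py format_authors_mla_py_alt
  have hsep : (" and ".toList) ≠ [] := by decide
  rw [splitOn_eq_splitF _ _ hsep]
  by_cases hi : PySem.Chars.find authors.toList (" and ".toList) = -1
  · rw [splitF, dif_pos (Or.inl hi)]
    simp only [foldA_eq, PySem.List.enumerate_cons, List.nil_append, List.map_cons, zero_add,
               PySem.List.enumerate_nil, List.map_nil, contribA_zero]
    have hi' : PySem.Chars.find authors.toList [' ', 'a', 'n', 'd', ' '] = -1 := by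
      simpa using hi
    simp [hi', PySem.List.pyGetD, PySem.List.pyGet?, PySem.List.pyIdx?]
  · rw [splitF, dif_neg (by push_neg; exact ⟨hi, hsep⟩)]
    by_cases ht : PySem.Chars.isIn (" and ".toList)
        (authors.toList.drop ((PySem.Chars.find authors.toList (" and ".toList)).toNat +
          (" and ".toList).length)) = true
    · -- 3+ authors: the remainder after the first separator contains another one
      have htf : PySem.Chars.find (authors.toList.drop
          ((PySem.Chars.find authors.toList (" and ".toList)).toNat + (" and ".toList).length))
          (" and ".toList) ≠ -1 := by
        rw [PySem.Chars.find_ne_neg_one_iff]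
        exact (PySem.Chars.isIn_iff_infix _ _).mp ht
      rw [splitF, dif_neg (by push_neg; exact ⟨htf, hsep⟩)]
      obtain ⟨u, v, huv⟩ : ∃ u v, splitF (" and ".toList)
          ((authors.toList.drop ((PySem.Chars.find authors.toList (" and ".toList)).toNat +
            (" and ".toList).length)).drop
            ((PySem.Chars.find (authors.toList.drop
              ((PySem.Chars.find authors.toList (" and ".toList)).toNat +
                (" and ".toList).length)) (" and ".toList)).toNat + (" and ".toList).length)) = u :: v := by
        cases hx : splitF (" and ".toList) _ with
        | nil => exact absurd hx (splitF_ne_nil _ _)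
        | cons u v => exact ⟨u, v, rfl⟩
      rw [huv]
      simp only [foldA_eq, PySem.List.enumerate_cons, List.nil_append, List.map_cons, zero_add,
                 contribA_zero]
      have hv : (0 : Int) ≤ (v.length : Int) + 1 + 1 := by positivity
      have hi' : ¬ PySem.Chars.find authors.toList [' ', 'a', 'n', 'd', ' '] = -1 := by
        simpa using hi
      have ht' : PySem.Chars.isIn [' ', 'a', 'n', 'd', ' ']
          (List.drop ((PySem.Chars.find authors.toList [' ', 'a', 'n', 'd', ' ']).toNat + 5)
            authors.toList) = true := by simpa using ht
      simp [hi', ht', hv, PySem.List.pyGetD, PySem.List.pyGet?, PySem.List.pyIdx?]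
    · -- exactly 2 authors
      have htf : PySem.Chars.find (authors.toList.drop
          ((PySem.Chars.find authors.toList (" and ".toList)).toNat + (" and ".toList).length))
          (" and ".toList) = -1 := by
        rw [PySem.Chars.find_eq_neg_one_iff]
        exact (PySem.Chars.isIn_eq_false_iff _ _).mp (by simpa using ht)
      rw [splitF, dif_pos (Or.inl htf)]
      simp only [foldA_eq, PySem.List.enumerate_cons, List.nil_append, List.map_cons, zero_add,
                 PySem.List.enumerate_nil, List.map_nil, contribA_zero,
                 contribA_ne 1 _ (by omega)]
      have hi' : ¬ PySem.Chars.find authors.toList [' ', 'a', 'n', 'd', ' '] = -1 := by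
        simpa using hi
      have ht' : ¬ PySem.Chars.isIn [' ', 'a', 'n', 'd', ' ']
          (List.drop ((PySem.Chars.find authors.toList [' ', 'a', 'n', 'd', ' ']).toNat + 5)
            authors.toList) = true := by simpa using ht
      simp [hi', ht', PySem.List.pyGetD, PySem.List.pyGet?, PySem.List.pyIdx?]
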